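-- pv_equiv track=rewrite | github.com/chenxin-hdu/HetFL | defects4j/coverage_analysis.py | decode_type_signature_symbol
-- ===== SOURCE A (Python) =====
-- dict_type_signature_symbol2full_name = {
--     "B": "byte",
--     "C": "char",
--     "D": "double",
--     "F": "float",
--     "I": "int",
--     "J": "long",
--     "O": "object",
--     "S": "short",
--     "V": "void",
--     "Z": "boolean",
-- }
--
-- def decode_origin_type_signature_symbol(signature):
--     if len(signature) == 1:
--         return dict_type_signature_symbol2full_name.get(signature)
--     decode_signature = []
--     array_flag = False
--     for key in signature:
--         if key == "[":
--             array_flag = True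
--             continue
--         decode_key = dict_type_signature_symbol2full_name.get(key)
--         if array_flag:
--             decode_signature.append("[" + decode_key)
--         else:
--             decode_signature.append(decode_key)
--         array_flag = False
--
--     decode_signature = ";".join(decode_signature)
--     return decode_signature
--
-- def decode_type_signature_symbol(signature, clz_path):
--     decode_param = ""
--     if signature.startswith("["):
--         decode_param += "["
--         signature = signature[1:]
--     if signature.startswith("L"):
--         signature = signature[1:]
--         signature = signature.split("/")[-1]
--         decode_param += signature.strip(";")
--     else:
--         key = signature[0]
--         if key in dict_type_signature_symbol2full_name:
--             decode_param += decode_origin_type_signature_symbol(key)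
--         if len(signature) > 1:
--             decode_param += f";{decode_type_signature_symbol(signature[1:], clz_path)}"
--     return decode_param
-- ===== SOURCE B (Python) =====
-- dict_type_signature_symbol2full_name = {
--     "B": "byte",
--     "C": "char",
--     "D": "double",
--     "F": "float",
--     "I": "int",
--     "J": "long",
--     "O": "object",
--     "S": "short",
--     "V": "void",
--     "Z": "boolean",
-- }
--
-- def decode_type_signature_symbol(signature, clz_path):
--     # single-pass iterative parser: walk an index, collect decoded tokens, join once
--     parts = []
--     i = 0
--     n = len(signature)
--     while i < n:
--         prefix = ""
--         if signature[i] == "[":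
--             prefix = "["
--             i += 1
--         if i < n and signature[i] == "L":
--             parts.append(prefix + signature[i + 1:].split("/")[-1].strip(";"))
--             break
--         key = signature[i]  # IndexError on a dangling trailing "[" (as in A)
--         parts.append(prefix + dict_type_signature_symbol2full_name.get(key, ""))
--         i += 1
--     return ";".join(parts)
-- ===== Notes on version B (the rewrite author's own statement) =====
-- stated objective: faster
-- what changed: replaces A's recursive one-token-per-call parser (which re-slices the remaining string and rebuilds the result by nested concatenation, plus a helper loop) with a single iterative index-walk that appends decoded tokens to a list and joins once
import Mathlib
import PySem

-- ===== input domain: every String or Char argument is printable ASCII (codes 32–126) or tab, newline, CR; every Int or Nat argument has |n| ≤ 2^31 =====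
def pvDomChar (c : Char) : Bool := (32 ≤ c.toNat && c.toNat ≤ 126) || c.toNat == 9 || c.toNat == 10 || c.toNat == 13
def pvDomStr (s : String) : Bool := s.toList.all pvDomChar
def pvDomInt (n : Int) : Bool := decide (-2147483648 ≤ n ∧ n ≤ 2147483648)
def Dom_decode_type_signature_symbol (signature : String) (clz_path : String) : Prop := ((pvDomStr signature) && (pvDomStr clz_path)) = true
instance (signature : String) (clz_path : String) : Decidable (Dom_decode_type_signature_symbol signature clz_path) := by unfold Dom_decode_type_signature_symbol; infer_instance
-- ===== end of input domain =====

-- B replaces A's recursive, string-reslicing parser with a single iterative pass that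
-- collects decoded tokens in a list and joins once (asymptotically faster in Python).

-- ===== PORT A =====
-- the module-level dict dict_type_signature_symbol2full_name; .get(key) = symFull key
def symFull : Char → Option (List Char)
  | 'B' => some "byte".toList
  | 'C' => some "char".toList
  | 'D' => some "double".toList
  | 'F' => some "float".toList
  | 'I' => some "int".toList
  | 'J' => some "long".toList
  | 'O' => some "object".toList
  | 'S' => some "short".toList
  | 'V' => some "void".toList
  | 'Z' => some "boolean".toList
  | _ => none

-- signature.split("/")[-1].strip(";")  (library calls, ported via PySem)
def lpartC (l : List Char) : List Char :=
  PySem.Chars.stripChars ((PySem.Chars.splitOn l ['/']).getLastD []) [';']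

-- the loop of decode_origin_type_signature_symbol (len(signature) != 1 branch);
-- an element is none exactly where Python's decode_key is None ("[" + None raises TypeError)
def decodeOriginLoop : List Char → Bool → List (Option (List Char))
  | [], _ => []
  | key :: rest, flag =>
      if key == '[' then decodeOriginLoop rest true
      else (if flag then (symFull key).map ('[' :: ·) else symFull key) :: decodeOriginLoop rest false

-- decode_origin_type_signature_symbol; none marks where Python raises TypeError / returns None
def decodeOrigin (sig : List Char) : Option (List Char) :=
  if sig.length == 1 then
    match sig with
    | [c] => symFull c
    | _ => none
  else
    let items := decodeOriginLoop sig false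
    if items.all Option.isSome then some (PySem.Chars.join [';'] (items.map (·.getD []))) else none

-- decode_type_signature_symbol's body on the char list (recursion on signature[1:]);
-- branches in Python's order: leading "[", then startswith("L"), then key = signature[0]
def goA : List Char → List Char
  | [] => []                                   -- Python: signature[0] raises IndexError (excluded by Pre_)
  | '[' :: 'L' :: rest => '[' :: lpartC rest
  | ['['] => ['[']                             -- Python: signature[0] raises IndexError (excluded by Pre_)
  | '[' :: k :: rest =>
      '[' :: ((if (symFull k).isSome then (decodeOrigin [k]).getD [] else [])
        ++ (if rest.length > 0 then ';' :: goA rest else []))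
  | 'L' :: rest => lpartC rest
  | k :: rest =>
      (if (symFull k).isSome then (decodeOrigin [k]).getD [] else [])
        ++ (if rest.length > 0 then ';' :: goA rest else [])

def decode_type_signature_symbol (signature : String) (clz_path : String) : String :=
  String.ofList (goA signature.toList)

-- ===== PORT B =====
-- the while loop of Source B: walk the remaining chars, append each decoded token to parts
def goB : List Char → List (List Char) → List (List Char)
  | [], parts => parts
  | '[' :: 'L' :: rest, parts => parts ++ ['[' :: lpartC rest]
  | ['['], parts => parts                      -- Python: signature[i] raises IndexError (excluded by Pre_)
  | '[' :: k :: rest, parts => goB rest (parts ++ ['[' :: (symFull k).getD []])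
  | 'L' :: rest, parts => parts ++ [lpartC rest]
  | k :: rest, parts => goB rest (parts ++ [(symFull k).getD []])

def decode_type_signature_symbol_alt (signature : String) (clz_path : String) : String :=
  String.ofList (PySem.Chars.join [';'] (goB signature.toList []))

-- ===== PRECONDITION & SPEC =====
-- token-grammar check: each token is a primitive char, '[' + one char, or an L-segment
-- consuming the rest; false exactly when the token stream ends in a dangling '['
def okSig : List Char → Bool
  | [] => true
  | [c] => c != '['
  | c :: d :: rest =>
      if c == '[' then (d == 'L' || okSig rest)
      else if c == 'L' then true
      else okSig (d :: rest)

-- Pre_ excludes exactly the inputs on which A raises IndexError: the empty signature and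
-- signatures whose token stream ends in a dangling '['
def Pre_decode_type_signature_symbol (signature : String) (clz_path : String) : Prop :=
  signature ≠ "" ∧ okSig signature.toList = true
instance (signature : String) (clz_path : String) : Decidable (Pre_decode_type_signature_symbol signature clz_path) := by unfold Pre_decode_type_signature_symbol; infer_instance
def pvWitness_decode_type_signature_symbol : String × String := ("[I", "p")

def Spec_decode_type_signature_symbol (signature : String) (clz_path : String) (out : String) : Prop := out = decode_type_signature_symbol_alt signature clz_path
instance (signature : String) (clz_path : String) (out : String) : Decidable (Spec_decode_type_signature_symbol signature clz_path out) := by unfold Spec_decode_type_signature_symbol; infer_instance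

-- ===== CLAIM (what is proved, stated in full; the proofs are below) =====
def Claim_equal_decode_type_signature_symbol : Prop := ∀ (signature : String) (clz_path : String), Dom_decode_type_signature_symbol signature clz_path → Pre_decode_type_signature_symbol signature clz_path → Spec_decode_type_signature_symbol signature clz_path (decode_type_signature_symbol signature clz_path)

-- ===== LEMMAS AND PROOFS =====

lemma join_append_single (t : List Char) (parts : List (List Char)) :
    PySem.Chars.join [';'] (parts ++ [t]) =
      if parts = [] then t else PySem.Chars.join [';'] parts ++ ';' :: t := by
  induction parts with
  | nil => simp [PySem.Chars.join, List.intercalate]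
  | cons p ps ih =>
      cases ps with
      | nil => simp [PySem.Chars.join, List.intercalate, List.intersperse]
      | cons q qs =>
          simp only [PySem.Chars.join] at *
          simp [List.intercalate, List.intersperse] at *
          simp [ih]

lemma decodeOrigin_single (k : Char) : decodeOrigin [k] = symFull k := by
  simp [decodeOrigin]

-- loop invariant: running B's loop on remainder s with tokens `parts` already collected
-- yields, after the join, A's recursive result for s appended behind the joined parts
lemma goA_goB_agree : ∀ (s : List Char) (parts : List (List Char)), okSig s = true → s ≠ [] →
    PySem.Chars.join [';'] (goB s parts) =
      if parts = [] then goA s else PySem.Chars.join [';'] parts ++ ';' :: goA s := by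
  intro s
  induction s using goA.induct with
  | case1 => intro parts _ h; exact absurd rfl h
  | case2 rest => intro parts hok _; simp [goA, goB, join_append_single]
  | case3 => intro parts hok _; simp [okSig] at hok
  | case4 k rest h1 ih =>
      intro parts hok _
      cases rest with
      | nil => cases h : symFull k <;> simp [goA, goB, join_append_single, decodeOrigin_single, h]
      | cons r rs =>
          have hok' : okSig (r :: rs) = true := by
            have h := hok; simp [okSig] at h; tauto
          rw [goA, goB, ih (parts ++ ['[' :: (symFull k).getD []]) hok' (by simp)]
          · rw [join_append_single]
            split_ifs <;> simp_all [decodeOrigin_single]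
          all_goals exact h1
  | case5 rest => intro parts hok _; simp [goA, goB, join_append_single]
  | case6 k rest h1 h2 h3 h4 ih =>
      intro parts hok _
      have hkb : k ≠ '[' := by
        intro hk; cases rest with
        | nil => exact h2 hk rfl
        | cons a b => exact h3 a b hk rfl
      cases rest with
      | nil => cases h : symFull k <;> simp [goA, goB, join_append_single, decodeOrigin_single, h]
      | cons r rs =>
          have hok' : okSig (r :: rs) = true := by
            have h := hok; simp [okSig, hkb] at h; tauto
          rw [goA, goB, ih (parts ++ [(symFull k).getD []]) hok' (by simp)]
          · rw [join_append_single]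
            split_ifs <;> simp_all [decodeOrigin_single]
          all_goals first | exact h1 | exact h2 | exact h3 | exact h4

-- ===== VERDICT (by name: the statement is the Claim_ definition above) =====
theorem decode_type_signature_symbol_spec : Claim_equal_decode_type_signature_symbol := by
  intro signature clz_path _ hpre
  unfold Spec_decode_type_signature_symbol decode_type_signature_symbol decode_type_signature_symbol_alt
  obtain ⟨hne, hok⟩ := hpre
  have hl : signature.toList ≠ [] := fun h => hne (String.toList_eq_nil_iff.mp h)
  rw [goA_goB_agree signature.toList [] hok hl]
  simp
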